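-- pv_equiv track=rewrite | github.com/easternpillar/AlgorithmTraining | Programmers Level 1&2 완전 정복/신고 결과 받기.py | solution
-- ===== SOURCE A (Python) =====
-- from collections import defaultdict
--
-- def solution(id_list, report, k):
--     answer = []
--     report_dict = defaultdict(set)
--     cnt_dict = defaultdict(int)
--     for re in report:
--         a, b = re.split(" ")
--         report_dict[b].add(a)
--
--     for key in report_dict:
--         if len(report_dict[key]) >= k:
--             for value in report_dict[key]:
--                 cnt_dict[value] += 1
--
--     for id in id_list:
--         answer.append(cnt_dict[id])
--
--     return answer
-- ===== SOURCE B (Python) =====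
-- def _pair(r):
--     a, b = r.split(" ")
--     return (a, b)
--
-- def solution(id_list, report, k):
--     # sort the deduplicated (reporter, reported) pairs by reported user, then
--     # scan consecutive runs: a run of length >= k bans its reported user, and
--     # each reporter in that run gets one mail.
--     pairs = sorted(dict.fromkeys(map(_pair, report)), key=lambda p: p[1])
--     tally = {}
--     n = len(pairs)
--     i = 0
--     while i < n:
--         j = i
--         while j < n and pairs[j][1] == pairs[i][1]:
--             j += 1
--         if j - i >= k:
--             for a, _ in pairs[i:j]:
--                 tally[a] = tally.get(a, 0) + 1
--         i = j
--     return [tally.get(x, 0) for x in id_list]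
-- ===== Notes on version B (the rewrite author's own statement) =====
-- stated objective: alternative
-- what changed: Instead of A's dict-of-reporter-sets with nested counting loops, B sorts the deduplicated (reporter, reported) pairs by reported user and makes one linear scan over consecutive runs: each run of length >= k bumps its reporters' tally; answers are read off the tally.
import Mathlib
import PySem

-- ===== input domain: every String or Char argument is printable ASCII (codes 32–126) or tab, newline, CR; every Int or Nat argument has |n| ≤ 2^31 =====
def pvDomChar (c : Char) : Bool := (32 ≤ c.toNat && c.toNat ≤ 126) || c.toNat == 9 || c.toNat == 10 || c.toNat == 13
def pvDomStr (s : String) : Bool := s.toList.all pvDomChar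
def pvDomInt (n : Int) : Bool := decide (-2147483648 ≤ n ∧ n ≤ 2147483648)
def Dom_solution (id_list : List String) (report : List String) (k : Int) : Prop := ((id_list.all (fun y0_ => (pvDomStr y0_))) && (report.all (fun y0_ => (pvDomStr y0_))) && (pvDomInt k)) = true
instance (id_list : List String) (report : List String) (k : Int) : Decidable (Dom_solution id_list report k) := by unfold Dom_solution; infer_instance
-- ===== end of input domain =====

-- One honest line: B replaces A's dict-of-reporter-sets and nested counting loops by sorting the deduplicated
-- (reporter, reported) pairs by reported user and scanning consecutive runs (a run of length ≥ k bumps its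
-- reporters' tally); equal return value wherever A returns (Pre_ excludes the lines on which A raises).

-- r.split(" ") destructured into (a, b); the ("", "") branch is unreachable under Pre_ (Python raises ValueError there)
def parsePair (r : String) : String × String :=
  match PySem.Str.split? r " " with
  | some [a, b] => (a, b)
  | _ => ("", "")

-- ===== PORT A =====
def solution (id_list : List String) (report : List String) (k : Int) : List Int :=
  let report_dict : PySem.Dict String (PySem.Set String) :=
    report.foldl (fun d r =>
      let p := parsePair r
      d.modify p.2 PySem.Set.empty (fun s => PySem.Set.add s p.1)) PySem.Dict.empty
  let cnt_dict : PySem.Dict String Int :=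
    report_dict.items.foldl (fun c q =>
      if k ≤ PySem.Set.len q.2 then
        q.2.foldl (fun c v => c.modify v 0 (fun x => x + 1)) c
      else c) PySem.Dict.empty
  let answer := id_list.foldl (fun acc i => acc ++ [cnt_dict.getD i 0]) []
  answer

-- ===== PORT B =====
-- the outer while loop of Source B: consume one run of pairs sharing a reported user per step
-- (the inner 'while j' locates the run = the longest equal-snd prefix; 'j - i >= k' is the run length test)
def scanRuns (k : Int) : List (String × String) → PySem.Dict String Int → PySem.Dict String Int
  | [], tally => tally
  | p :: rest, tally =>
      let run := p :: rest.takeWhile (fun q => q.2 == p.2)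
      let tally' := if k ≤ (run.length : Int) then
          run.foldl (fun t q => t.modify q.1 0 (fun x => x + 1)) tally
        else tally
      scanRuns k (rest.dropWhile (fun q => q.2 == p.2)) tally'
termination_by l _ => l.length
decreasing_by
  exact Nat.lt_succ_of_le (List.length_dropWhile_le _ _)

def solution_alt (id_list : List String) (report : List String) (k : Int) : List Int :=
  let pairs := PySem.List.sorted (PySem.List.dedup (report.map parsePair)) (fun p => p.2) false
  let tally := scanRuns k pairs PySem.Dict.empty
  id_list.map (fun x => tally.getD x 0)

-- ===== PRECONDITION & SPEC =====
-- Pre_ excludes exactly the reports on which Python A raises ValueError (a line whose split(" ") has ≠ 2 parts).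
def Pre_solution (id_list : List String) (report : List String) (k : Int) : Prop :=
  ∀ r ∈ report, ((PySem.Str.split? r " ").getD []).length = 2
instance (id_list : List String) (report : List String) (k : Int) : Decidable (Pre_solution id_list report k) := by unfold Pre_solution; infer_instance
def pvWitness_solution : List String × List String × Int :=
  (["muzi", "frodo", "apeach"], ["muzi frodo", "apeach frodo", "muzi frodo"], 1)

def Spec_solution (id_list : List String) (report : List String) (k : Int) (out : List Int) : Prop := out = solution_alt id_list report k
instance (id_list : List String) (report : List String) (k : Int) (out : List Int) : Decidable (Spec_solution id_list report k out) := by unfold Spec_solution; infer_instance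

-- ===== CLAIM (what is proved, stated in full; the proofs are below) =====
def Claim_equal_solution : Prop := ∀ (id_list : List String) (report : List String) (k : Int), Dom_solution id_list report k → Pre_solution id_list report k → Spec_solution id_list report k (solution id_list report k)

-- ===== LEMMAS AND PROOFS =====

-- A's first loop, per key: the set stored at b collects the reporters of the lines reported against b
theorem rd_getD (report : List String) (d : PySem.Dict String (PySem.Set String)) (b : String) :
    (report.foldl (fun d r => PySem.Dict.modify d (parsePair r).2 PySem.Set.empty
        (fun s => PySem.Set.add s (parsePair r).1)) d).getD b PySem.Set.empty
      = PySem.Set.update (d.getD b PySem.Set.empty)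
          (((report.map parsePair).filter (fun p => p.2 == b)).map (fun p => p.1)) := by
  induction report generalizing d with
  | nil => simp [PySem.Set.update_nil]
  | cons r t ih =>
    simp only [List.foldl_cons, ih, List.map_cons, List.filter_cons]
    by_cases hb : (parsePair r).2 = b
    · rw [hb]
      simp [PySem.Dict.getD_modify_self, PySem.Set.update_cons]
    · have : ((parsePair r).2 == b) = false := by simp [hb]
      simp [this, PySem.Dict.getD_modify, Ne.symm hb]

-- A's second loop: the running count at id gains, per kept key, the number of occurrences of id in its set
theorem cnt_getD (k : Int) (items : List (String × PySem.Set String)) (c : PySem.Dict String Int) (id : String) :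
    (items.foldl (fun c q =>
        if k ≤ PySem.Set.len q.2 then q.2.foldl (fun c v => c.modify v 0 (fun x => x + 1)) c else c) c).getD id 0
      = c.getD id 0 + (items.map (fun q => if k ≤ PySem.Set.len q.2 then (q.2.count id : Int) else 0)).sum := by
  induction items generalizing c with
  | nil => simp
  | cons q t ih =>
    rw [List.foldl_cons, List.map_cons, List.sum_cons, ih]
    by_cases hq : k ≤ PySem.Set.len q.2
    · rw [if_pos hq, if_pos hq, PySem.Dict.getD_foldl_modify_add_one]; ring
    · rw [if_neg hq, if_neg hq]; ring

-- count in a duplicate-free list is a membership test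
theorem count_nodup {α : Type} [DecidableEq α] (l : List α) (h : l.Nodup) (a : α) :
    l.count a = if a ∈ l then 1 else 0 := by
  split_ifs with hm
  · exact List.count_eq_one_of_mem h hm
  · exact List.count_eq_zero_of_not_mem hm

-- the first components of duplicate-free pairs filtered to a fixed second component are duplicate-free
theorem nodup_map_fst_filter (M : List (String × String)) (h : M.Nodup) (b : String) :
    ((M.filter (fun p => p.2 == b)).map (fun p => p.1)).Nodup := by
  apply (List.Nodup.filter _ h).map_on
  intro p hp q hq hpq
  have hp2 : p.2 = b := by simpa using (List.of_mem_filter hp)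
  have hq2 : q.2 = b := by simpa using (List.of_mem_filter hq)
  exact Prod.ext hpq (hp2.trans hq2.symm)

theorem mem_fst_filter (N : List (String × String)) (b a : String) :
    (a ∈ (N.filter (fun p => p.2 == b)).map (fun p => p.1)) ↔ (a, b) ∈ N := by
  simp only [List.mem_map, List.mem_filter, beq_iff_eq]
  constructor
  · rintro ⟨⟨x, y⟩, ⟨hp, rfl⟩, rfl⟩; exact hp
  · intro h; exact ⟨(a, b), ⟨h, rfl⟩, rfl⟩

-- a 0/1 double-if sum is a countP
theorem sum_ite2 (xs : List String) (P Q : String → Prop) [DecidablePred P] [DecidablePred Q] :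
    (xs.map (fun b => if P b then (if Q b then (1 : Int) else 0) else 0)).sum
      = ((xs.countP (fun b => decide (P b) && decide (Q b)) : Nat) : Int) := by
  induction xs with
  | nil => simp
  | cons a t ih =>
    simp only [List.map_cons, List.sum_cons, List.countP_cons, ih]
    by_cases hP : P a <;> by_cases hQ : Q a <;> simp [hP, hQ] <;> omega

theorem nodup_map_snd_of_fst_eq (N : List (String × String)) (h : N.Nodup)
    (Q : String × String → Bool) (idv : String) (hq : ∀ p, Q p = true → p.1 = idv) :
    ((N.filter Q).map (fun p => p.2)).Nodup := by
  apply (List.Nodup.filter _ h).map_on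
  intro p hp q hqq hpq
  exact Prod.ext ((hq p (List.of_mem_filter hp)).trans (hq q (List.of_mem_filter hqq)).symm) hpq

-- bridge: A's per-distinct-reported-user sum equals a countP over the deduplicated pairs
theorem count_partition (M : List (String × String)) (hM : M.Nodup) (Bs : List String) (hBs : Bs.Nodup)
    (hmem : ∀ b, b ∈ Bs ↔ b ∈ M.map (fun p => p.2)) (id : String)
    (C : String → Prop) [DecidablePred C] :
    Bs.countP (fun b => decide (C b) && decide ((id, b) ∈ M))
      = M.countP (fun p => (p.1 == id) && decide (C p.2)) := by
  rw [List.countP_eq_length_filter, List.countP_eq_length_filter]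
  have hN : ((M.filter (fun p => (p.1 == id) && decide (C p.2))).map (fun p => p.2)).Nodup := by
    refine nodup_map_snd_of_fst_eq M hM _ id (fun p hp => ?_)
    have hp' := hp
    simp only [Bool.and_eq_true, beq_iff_eq] at hp'
    exact hp'.1
  have hperm : (Bs.filter (fun b => decide (C b) && decide ((id, b) ∈ M))).Perm
      ((M.filter (fun p => (p.1 == id) && decide (C p.2))).map (fun p => p.2)) := by
    rw [List.perm_ext_iff_of_nodup (hBs.filter _) hN]
    intro b
    simp only [List.mem_filter, List.mem_map, Bool.and_eq_true, decide_eq_true_iff, beq_iff_eq]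
    constructor
    · rintro ⟨_, hC, hmemM⟩
      exact ⟨(id, b), ⟨hmemM, rfl, hC⟩, rfl⟩
    · rintro ⟨⟨x, y⟩, ⟨hp, rfl, hC⟩, rfl⟩
      exact ⟨(hmem _).2 (List.mem_map.mpr ⟨_, hp, rfl⟩), hC, hp⟩
  rw [hperm.length_eq, List.length_map]

-- every pair dropped by the run scan is reported against a strictly larger user (snds are sorted)
theorem dropWhile_snd_gt (b : String) (rest : List (String × String))
    (hpw : (rest.map Prod.snd).Pairwise (· ≤ ·)) (hle : ∀ q ∈ rest, b ≤ q.2) :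
    ∀ q ∈ rest.dropWhile (fun q => q.2 == b), b < q.2 := by
  induction rest with
  | nil => intro q hq; simp [List.dropWhile] at hq
  | cons r rs ih =>
    simp only [List.map_cons, List.pairwise_cons] at hpw
    intro q hq
    simp only [List.dropWhile_cons] at hq
    by_cases hr : (r.2 == b) = true
    · rw [if_pos hr] at hq
      exact ih hpw.2 (fun q hq' => hle q (List.mem_cons_of_mem _ hq')) q hq
    · rw [if_neg hr] at hq
      have hbr : b < r.2 := lt_of_le_of_ne (hle r (List.mem_cons_self))
        (fun e => hr (beq_iff_eq.mpr e.symm))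
      rcases List.mem_cons.1 hq with rfl | hq'
      · exact hbr
      · exact lt_of_lt_of_le hbr (hpw.1 _ (List.mem_map.2 ⟨q, hq', rfl⟩))

-- the run scan of Source B: on a list whose reported users are sorted, the tally at id gains one per pair
-- (id, b) whose reported user b occurs at least k times among the pairs
theorem scan_getD (k : Int) (S : List (String × String)) (t : PySem.Dict String Int) (id : String)
    (h : (S.map Prod.snd).Pairwise (· ≤ ·)) :
    (scanRuns k S t).getD id 0 = t.getD id 0 +
      ((S.countP (fun p => (p.1 == id) && decide (k ≤ (((S.map Prod.snd).count p.2 : Nat) : Int)))) : Nat) := by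
  match S with
  | [] => simp [scanRuns]
  | p :: rest =>
    rw [scanRuns]
    have hpw : (rest.map Prod.snd).Pairwise (· ≤ ·) := by
      simp only [List.map_cons, List.pairwise_cons] at h; exact h.2
    have hle : ∀ q ∈ rest, p.2 ≤ q.2 := by
      simp only [List.map_cons, List.pairwise_cons] at h
      exact fun q hq => h.1 _ (List.mem_map.2 ⟨q, hq, rfl⟩)
    set run := p :: rest.takeWhile (fun q => q.2 == p.2) with hrun
    set dw := rest.dropWhile (fun q => q.2 == p.2) with hdw
    have hsplit : p :: rest = run ++ dw := by
      rw [hrun, hdw, List.cons_append, List.takeWhile_append_dropWhile]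
    have hgt : ∀ q ∈ dw, p.2 < q.2 := hdw ▸ dropWhile_snd_gt p.2 rest hpw hle
    have hrunsnd : ∀ q ∈ run, q.2 = p.2 := by
      intro q hq
      rw [hrun] at hq
      rcases List.mem_cons.1 hq with rfl | hq'
      · rfl
      · simpa using List.mem_takeWhile_imp hq'
    have hdwpw : (dw.map Prod.snd).Pairwise (· ≤ ·) :=
      List.Pairwise.sublist (List.Sublist.map Prod.snd (hdw ▸ List.dropWhile_sublist _)) hpw
    rw [hsplit]
    -- count of p.2 among all reported users is the run length
    have hcount_run : ((run ++ dw).map Prod.snd).count p.2 = run.length := by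
      rw [List.map_append, List.count_append]
      have h1 : (run.map Prod.snd).count p.2 = run.length := by
        rw [List.count_eq_length.2 (by
          intro b hb
          obtain ⟨q, hq, rfl⟩ := List.mem_map.1 hb
          exact (hrunsnd q hq).symm), List.length_map]
      have h2 : (dw.map Prod.snd).count p.2 = 0 := by
        rw [List.count_eq_zero]
        intro hmem
        obtain ⟨q, hq, hq2⟩ := List.mem_map.1 hmem
        exact absurd hq2 (ne_of_gt (hgt q hq))
      omega
    -- counts of later users ignore the run
    have hcount_dw : ∀ q ∈ dw, ((run ++ dw).map Prod.snd).count q.2 = (dw.map Prod.snd).count q.2 := by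
      intro q hq
      rw [List.map_append, List.count_append]
      have h1 : (run.map Prod.snd).count q.2 = 0 := by
        rw [List.count_eq_zero]
        intro hmem
        obtain ⟨q', hq', hq2⟩ := List.mem_map.1 hmem
        exact absurd ((hrunsnd q' hq').symm.trans hq2) (ne_of_lt (hgt q hq))
      omega
    -- split the countP along run ++ dw
    have hcountP : (run ++ dw).countP
        (fun p' => (p'.1 == id) && decide (k ≤ ((((run ++ dw).map Prod.snd).count p'.2 : Nat) : Int)))
        = (if k ≤ (run.length : Int) then (run.map Prod.fst).count id else 0)
          + dw.countP (fun p' => (p'.1 == id) && decide (k ≤ (((dw.map Prod.snd).count p'.2 : Nat) : Int))) := by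
      rw [List.countP_append]
      congr 1
      · rw [List.countP_congr (fun p' hp' => by rw [hrunsnd p' hp', hcount_run])]
        by_cases hk : k ≤ (run.length : Int)
        · rw [if_pos hk, List.countP_congr
            (fun (p' : String × String) _ => show ((p'.1 == id) && decide (k ≤ ((run.length : Nat) : Int))) = true
                ↔ (p'.1 == id) = true by simp [hk]),
            List.count_eq_countP, List.countP_map]
          rfl
        · rw [if_neg hk, List.countP_eq_zero.2 (fun p' _ => by simp [hk])]
      · exact List.countP_congr (fun p' hp' => by rw [hcount_dw p' hp'])
    -- the tally after this run
    have hstep : (if k ≤ ((run.length : Nat) : Int) then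
          run.foldl (fun t q => t.modify q.1 0 (fun x => x + 1)) t else t).getD id 0
        = t.getD id 0 + (if k ≤ (run.length : Int) then ((run.map Prod.fst).count id : Int) else 0) := by
      by_cases hk : k ≤ (run.length : Int)
      · have hfold : run.foldl (fun t q => t.modify q.1 0 (fun x => x + 1)) t
            = (run.map Prod.fst).foldl (fun t v => t.modify v 0 (fun x => x + 1)) t :=
          (List.foldl_map (f := Prod.fst)
            (g := fun t v => PySem.Dict.modify t v 0 (fun x => x + 1)) (l := run) (init := t)).symm
        rw [if_pos hk, if_pos hk, hfold, PySem.Dict.getD_foldl_modify_add_one]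
      · rw [if_neg hk, if_neg hk, add_zero]
    rw [scan_getD k dw _ id hdwpw, hstep, hcountP]
    push_cast
    split_ifs <;> ring
termination_by S.length
decreasing_by
  exact Nat.lt_succ_of_le (List.length_dropWhile_le _ _)

-- ===== VERDICT (by name: the statement is the Claim_ definition above) =====
theorem solution_spec : Claim_equal_solution := by
  intro id_list report k _ _
  unfold Spec_solution
  simp only [solution, solution_alt, PySem.List.dedup_eq_ofList]
  rw [PySem.List.foldl_append_singleton_eq_map, List.nil_append]
  refine List.map_congr_left (fun id _ => ?_)
  set L := List.map parsePair report with hL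
  set M := PySem.Set.ofList L with hMdef
  -- ===== A side: reduce to a countP over the deduplicated pairs M =====
  have hkeys0 := PySem.Dict.keys_foldl_modify_key report (fun r => (parsePair r).2) PySem.Set.empty
      (fun _ r => fun s => PySem.Set.add s (parsePair r).1) PySem.Dict.empty
  simp only [PySem.Dict.keys_empty, PySem.Set.update_nil_left] at hkeys0
  have hmapsnd : List.map (fun r => (parsePair r).2) report = L.map (fun p => p.2) := by
    rw [hL, List.map_map]; rfl
  rw [hmapsnd] at hkeys0
  have hndk : (List.foldl (fun d r => PySem.Dict.modify d (parsePair r).2 PySem.Set.empty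
      fun s => PySem.Set.add s (parsePair r).1) PySem.Dict.empty report).keys.Nodup := by
    rw [hkeys0]; exact PySem.Set.nodup_ofList _
  rw [PySem.Dict.items_eq_map_keys _ hndk PySem.Set.empty, hkeys0, cnt_getD]
  simp only [PySem.Dict.getD_empty, zero_add, List.map_map]
  have hnodupM : M.Nodup := hMdef ▸ PySem.Set.nodup_ofList L
  have hterm : ∀ b ∈ PySem.Set.ofList (List.map (fun p => p.2) L),
      ((fun q => if k ≤ PySem.Set.len q.2 then ((List.count id q.2 : Nat) : Int) else 0) ∘
        (fun b => (b, (List.foldl (fun d r => PySem.Dict.modify d (parsePair r).2 PySem.Set.empty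
          fun s => PySem.Set.add s (parsePair r).1) PySem.Dict.empty report).getD b PySem.Set.empty))) b
      = if k ≤ ((List.count b (M.map (fun p => p.2)) : Nat) : Int)
        then (if (id, b) ∈ M then (1 : Int) else 0) else 0 := by
    intro b _
    simp only [Function.comp]
    rw [rd_getD, PySem.Dict.getD_empty, PySem.Set.update_empty, ← hL]
    have hnodupS := PySem.Set.nodup_ofList ((L.filter (fun p => p.2 == b)).map (fun p => p.1))
    have hSperm : (PySem.Set.ofList ((L.filter (fun p => p.2 == b)).map (fun p => p.1))).Perm
        ((M.filter (fun p => p.2 == b)).map (fun p => p.1)) := by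
      rw [List.perm_ext_iff_of_nodup hnodupS (nodup_map_fst_filter M hnodupM b)]
      intro a
      rw [PySem.Set.mem_ofList, mem_fst_filter, mem_fst_filter, hMdef, PySem.Set.mem_ofList]
    have hlen : (PySem.Set.ofList ((L.filter (fun p => p.2 == b)).map (fun p => p.1))).length
        = List.count b (M.map (fun p => p.2)) := by
      rw [hSperm.length_eq, List.length_map, List.count_eq_countP, List.countP_map,
        List.countP_eq_length_filter]
      rfl
    have hcnt : List.count id (PySem.Set.ofList ((L.filter (fun p => p.2 == b)).map (fun p => p.1)))
        = if (id, b) ∈ M then 1 else 0 := by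
      rw [hSperm.count_eq, count_nodup _ (nodup_map_fst_filter M hnodupM b)]
      simp only [mem_fst_filter]
    have hlen' : PySem.Set.len (PySem.Set.ofList ((L.filter (fun p => p.2 == b)).map (fun p => p.1)))
        = ((List.count b (M.map (fun p => p.2)) : Nat) : Int) := by
      simp [PySem.Set.len, hlen]
    rw [hlen', hcnt]
    split_ifs <;> simp
  rw [List.map_congr_left hterm, sum_ite2]
  have hmem : ∀ b, b ∈ PySem.Set.ofList (List.map (fun p => p.2) L) ↔ b ∈ M.map (fun p => p.2) := by
    intro b
    rw [PySem.Set.mem_ofList]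
    constructor
    · intro h
      obtain ⟨p, hp, rfl⟩ := List.mem_map.1 h
      exact List.mem_map.2 ⟨p, (PySem.Set.mem_ofList L p).2 hp, rfl⟩
    · intro h
      obtain ⟨p, hp, rfl⟩ := List.mem_map.1 h
      exact List.mem_map.2 ⟨p, (PySem.Set.mem_ofList L p).1 hp, rfl⟩
  rw [show (PySem.Set.ofList (List.map (fun p => p.2) L)).countP
        (fun b => decide (k ≤ ((List.count b (M.map fun p => p.2) : Nat) : Int)) && decide ((id, b) ∈ M))
      = M.countP (fun p => (p.1 == id) && decide (k ≤ ((List.count p.2 (M.map fun p => p.2) : Nat) : Int)))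
    from count_partition M hnodupM _ (PySem.Set.nodup_ofList _) hmem id
      (fun b => k ≤ ((List.count b (M.map fun p => p.2) : Nat) : Int))]
  -- ===== B side: the sorted run scan computes the same countP =====
  set S := PySem.List.sorted M (fun p => p.2) false with hS
  have hperm : S.Perm M := PySem.List.sorted_perm M _ _
  have hsorted : (S.map Prod.snd).Pairwise (· ≤ ·) := PySem.List.sorted_map_key_pairwise M _
  have hB := scan_getD k S PySem.Dict.empty id hsorted
  rw [PySem.Dict.getD_empty, zero_add] at hB
  rw [hB]
  have hc : S.countP (fun p' => (p'.1 == id) && decide (k ≤ (((S.map Prod.snd).count p'.2 : Nat) : Int)))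
      = M.countP (fun p => (p.1 == id) && decide (k ≤ ((List.count p.2 (M.map fun p => p.2) : Nat) : Int))) := by
    rw [List.countP_congr (fun p' _ => by
      rw [show (S.map Prod.snd).count p'.2 = List.count p'.2 (M.map fun p => p.2) from
        (hperm.map Prod.snd).count_eq p'.2])]
    exact hperm.countP_eq _
  rw [hc]
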